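-- pv_equiv track=rewrite | github.com/thanieLee/thanie-CompetitiveProgramming_Repo | ICPCContests/GCPC2024/m.py | isValidOp
-- ===== SOURCE A (Python) =====
-- def isValidOp(arrOp):
--     hasValid = False
--
--     for op in arrOp:
--         if op == '+' or op == '-':
--             hasValid = True
--         elif hasValid and (op == '*' or op == '/'):
--             return False
--
--     return True
-- ===== SOURCE B (Python) =====
-- def isValidOp(arrOp):
--     arrOp = list(arrOp)
--     first = next((i for i, op in enumerate(arrOp) if op == '+' or op == '-'), None)
--     if first is None:
--         return True
--     return not any(op == '*' or op == '/' for op in arrOp[first + 1:])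
-- ===== Notes on version B (the rewrite author's own statement) =====
-- stated objective: alternative
-- what changed: A's single pass with a running hasValid flag becomes a two-phase find-first-'+'/'-'-index then check-suffix-for-'*'/'/' structure.
import Mathlib
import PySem

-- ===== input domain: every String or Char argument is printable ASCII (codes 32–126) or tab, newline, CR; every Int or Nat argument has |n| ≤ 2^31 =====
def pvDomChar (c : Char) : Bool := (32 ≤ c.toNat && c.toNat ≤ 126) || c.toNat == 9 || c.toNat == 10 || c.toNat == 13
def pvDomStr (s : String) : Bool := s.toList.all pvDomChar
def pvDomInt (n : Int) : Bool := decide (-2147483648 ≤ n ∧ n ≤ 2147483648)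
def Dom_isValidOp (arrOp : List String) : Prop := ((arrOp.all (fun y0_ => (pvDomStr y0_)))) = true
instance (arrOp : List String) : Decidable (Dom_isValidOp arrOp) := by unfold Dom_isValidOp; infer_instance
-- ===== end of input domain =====

-- B replaces A's single running-flag pass by a find-first-'+'/'-' index then a suffix scan for '*'/'/' (alternative decomposition, same cost).

-- ===== PORT A =====
-- A's loop carrying the hasValid flag; early `return False` is the `false` branch.
def pvLoopA : List String → Bool → Bool
  | [], _ => true
  | op :: rest, hasValid =>
    if op = "+" ∨ op = "-" then pvLoopA rest true
    else if hasValid ∧ (op = "*" ∨ op = "/") then false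
    else pvLoopA rest hasValid

def isValidOp (arrOp : List String) : Bool := pvLoopA arrOp false

-- ===== PORT B =====
def isValidOp_alt (arrOp : List String) : Bool :=
  match arrOp.findIdx? (fun op => op == "+" || op == "-") with
  | none => true
  | some i => ! ((arrOp.drop (i + 1)).any (fun op => op == "*" || op == "/"))

-- ===== PRECONDITION & SPEC =====
def Spec_isValidOp (arrOp : List String) (out : Bool) : Prop := out = isValidOp_alt arrOp
instance (arrOp : List String) (out : Bool) : Decidable (Spec_isValidOp arrOp out) := by unfold Spec_isValidOp; infer_instance

-- ===== CLAIM (what is proved, stated in full; the proofs are below) =====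
def Claim_equal_isValidOp : Prop := ∀ (arrOp : List String), Dom_isValidOp arrOp → Spec_isValidOp arrOp (isValidOp arrOp)

-- ===== LEMMAS AND PROOFS =====

-- With the flag already set, A's loop just checks the rest for '*' or '/'.
theorem pvLoopA_true (xs : List String) :
    pvLoopA xs true = ! (xs.any (fun op => op == "*" || op == "/")) := by
  induction xs with
  | nil => rfl
  | cons op rest ih =>
    simp only [pvLoopA, List.any_cons]
    by_cases h : op = "+" ∨ op = "-"
    · rcases h with h | h <;> subst h <;> simp [ih]
    · simp only [if_neg h]
      by_cases h2 : op = "*" ∨ op = "/"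
      · have : (op == "*" || op == "/") = true := by
          rcases h2 with h2 | h2 <;> subst h2 <;> rfl
        simp [h2, this]
      · have : (op == "*" || op == "/") = false := by
          simp only [Bool.or_eq_false_iff, beq_eq_false_iff_ne]
          exact ⟨fun e => h2 (Or.inl e), fun e => h2 (Or.inr e)⟩
        simp [h2, this, ih]

theorem isValidOp_spec_aux (arrOp : List String) : isValidOp arrOp = isValidOp_alt arrOp := by
  induction arrOp with
  | nil => rfl
  | cons op rest ih =>
    simp only [isValidOp, pvLoopA, isValidOp_alt] at *
    by_cases h : op = "+" ∨ op = "-"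
    · have hb : (op == "+" || op == "-") = true := by
        rcases h with h | h <;> subst h <;> rfl
      simp only [if_pos h, List.findIdx?_cons, hb, cond_true, List.drop_succ_cons, List.drop_zero]
      exact pvLoopA_true rest
    · have hb : (op == "+" || op == "-") = false := by
        simp only [Bool.or_eq_false_iff, beq_eq_false_iff_ne]
        exact ⟨fun e => h (Or.inl e), fun e => h (Or.inr e)⟩
      simp only [if_neg h, false_and, if_neg (by simp : ¬(False ∧ (op = "*" ∨ op = "/"))),
        List.findIdx?_cons, hb, cond_false]
      rw [ih]
      cases hf : rest.findIdx? (fun op => op == "+" || op == "-") with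
      | none => simp
      | some i => simp

-- ===== VERDICT (by name: the statement is the Claim_ definition above) =====
theorem isValidOp_spec : Claim_equal_isValidOp := by
  intro arrOp _
  exact isValidOp_spec_aux arrOp
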